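-- pv_equiv track=rewrite | github.com/undefineduser76/PythonAlgorithmStudy | Week2/Q3/네오.py | get_combination
-- ===== SOURCE A (Python) =====
-- def get_combination(order, course_to_get, max_course):
--     order = sorted(order)
--     combinations = []
--
--     def dfs(now_idx):
--         if len(now_idx) > max_course:
--             return
--         if course_to_get[len(now_idx)]:
--             combined_string = "".join([order[idx] for idx in now_idx])
--             combinations.append(combined_string)
--
--         last_idx = -1 if len(now_idx) == 0 else now_idx[-1]
--         for i in range(last_idx + 1, len(order)):
--             dfs(now_idx + [i])
--
--     dfs([])
--
--     return combinations
-- ===== SOURCE B (Python) =====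
-- def get_combination(order, course_to_get, max_course):
--     order = sorted(order)
--     n = len(order)
--     results = []
--     stack = [("", 0, 0)]  # (built string, next index to try, depth)
--     while stack:
--         s, start, depth = stack.pop()
--         if depth > max_course:
--             continue
--         if course_to_get[depth]:
--             results.append(s)
--         for i in reversed(range(start, n)):
--             stack.append((s + order[i], i + 1, depth + 1))
--     return results
-- ===== Notes on version B (the rewrite author's own statement) =====
-- stated objective: alternative
-- what changed: Replaces the nested recursive dfs closure that carries index lists and joins them at emission time by an iterative explicit-stack traversal whose entries carry the already-concatenated string, the next candidate index and the depth, pushing extensions in reverse so the pop order reproduces the pre-order emission.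
import Mathlib
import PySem

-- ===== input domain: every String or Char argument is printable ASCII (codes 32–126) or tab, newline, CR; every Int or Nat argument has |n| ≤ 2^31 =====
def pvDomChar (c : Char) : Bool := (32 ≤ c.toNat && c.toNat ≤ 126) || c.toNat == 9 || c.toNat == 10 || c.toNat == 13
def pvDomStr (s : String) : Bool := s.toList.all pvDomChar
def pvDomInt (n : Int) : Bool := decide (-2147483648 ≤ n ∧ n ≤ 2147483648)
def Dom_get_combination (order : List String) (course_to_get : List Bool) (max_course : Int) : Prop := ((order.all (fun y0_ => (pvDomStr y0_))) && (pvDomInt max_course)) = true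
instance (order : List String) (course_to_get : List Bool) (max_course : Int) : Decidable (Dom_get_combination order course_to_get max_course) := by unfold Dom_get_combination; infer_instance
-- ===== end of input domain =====

-- B replaces A's recursive dfs closure over index lists (joined at emission time) by an
-- iterative explicit-stack traversal carrying already-concatenated strings: an
-- alternative decomposition of the same enumeration, returning the identical list.

-- ===== PORT A =====
-- A's inner closure dfs(now_idx); acc is the `combinations` accumulator; the Python
-- local `last_idx` is written inline at its two use sites.  The fuel argument only
-- makes the recursion structural: the recursion depth from the root is at most
-- len(order)+1, so the initial fuel below is never exhausted.
def dfsA (order' : List String) (ctg : List Bool) (mc : Int) :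
    Nat → List Int → List String → List String
  | 0, _, acc => acc
  | fuel + 1, now, acc =>
    if (now.length : Int) > mc then acc
    else
      (PySem.List.pyRange ((if now.length = 0 then -1 else PySem.List.pyGetD now (-1) 0) + 1)
          (order'.length : Int) 1).foldl
        (fun a i => dfsA order' ctg mc fuel (now ++ [i]) a)
        (if PySem.List.pyGetD ctg (now.length : Int) false
          then acc ++ [PySem.Str.join "" (now.map (fun idx => PySem.List.pyGetD order' idx ""))]
          else acc)

def get_combination (order : List String) (course_to_get : List Bool) (max_course : Int) : List String :=
  dfsA (PySem.List.sorted order (fun x => x) false) course_to_get max_course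
    ((PySem.List.sorted order (fun x => x) false).length + 2) [] []

-- ===== PORT B =====
-- B's while loop: stack entries are (built string, next index to try, depth); the
-- Python push loop `for i in reversed(range(start, n))` is the reverse foldl.
def loopB (order' : List String) (ctg : List Bool) (mc : Int) :
    Nat → List (String × Int × Int) → List String → List String
  | 0, _, res => res
  | _ + 1, [], res => res
  | fuel + 1, (s, start, depth) :: rest, res =>
    if depth > mc then loopB order' ctg mc fuel rest res
    else
      loopB order' ctg mc fuel
        (((PySem.List.pyRange start (order'.length : Int) 1).reverse).foldl
          (fun stk i => (s ++ PySem.List.pyGetD order' i "", i + 1, depth + 1) :: stk) rest)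
        (if PySem.List.pyGetD ctg depth false then res ++ [s] else res)

def get_combination_alt (order : List String) (course_to_get : List Bool) (max_course : Int) : List String :=
  loopB (PySem.List.sorted order (fun x => x) false) course_to_get max_course
    (2 ^ ((PySem.List.sorted order (fun x => x) false).length + 1)) [("", 0, 0)] []

-- ===== PRECONDITION & SPEC =====
-- A raises IndexError iff it reaches a prefix whose length is outside course_to_get;
-- reachable emission depths are exactly 0 .. min(max_course, len(order)), so A returns
-- normally iff min(max_course, len(order)) < len(course_to_get).
def Pre_get_combination (order : List String) (course_to_get : List Bool) (max_course : Int) : Prop :=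
  min max_course (order.length : Int) < (course_to_get.length : Int)
instance (order : List String) (course_to_get : List Bool) (max_course : Int) : Decidable (Pre_get_combination order course_to_get max_course) := by unfold Pre_get_combination; infer_instance

def pvWitness_get_combination : List String × List Bool × Int := (["b", "a"], [true, false, true], 5)

def Spec_get_combination (order : List String) (course_to_get : List Bool) (max_course : Int) (out : List String) : Prop := out = get_combination_alt order course_to_get max_course
instance (order : List String) (course_to_get : List Bool) (max_course : Int) (out : List String) : Decidable (Spec_get_combination order course_to_get max_course out) := by unfold Spec_get_combination; infer_instance

-- ===== CLAIM (what is proved, stated in full; the proofs are below) =====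
def Claim_equal_get_combination : Prop := ∀ (order : List String) (course_to_get : List Bool) (max_course : Int), Dom_get_combination order course_to_get max_course → Pre_get_combination order course_to_get max_course → Spec_get_combination order course_to_get max_course (get_combination order course_to_get max_course)

-- ===== LEMMAS AND PROOFS =====

-- now_idx[-1] of now + [i] is i
theorem pyGetD_snoc_neg_one {α : Type} (l : List α) (x : α) (d : α) :
    PySem.List.pyGetD (l ++ [x]) (-1) d = x := by
  simp [PySem.List.pyGetD, PySem.List.pyGet?, PySem.List.pyIdx?]

-- flatMap over an attached list (the attach is only there for termination)
theorem flatMap_attach_val {α β : Type} (l : List α) (G : α → List β) :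
    (l.attach).flatMap (fun i => G i.1) = l.flatMap G := by
  conv_rhs => rw [← List.attach_map_subtype_val l]
  rw [List.flatMap_map]

-- the common abstract enumeration both ports compute: the strings emitted in
-- pre-order from the node (s, start, depth)
def gen (order' : List String) (ctg : List Bool) (mc : Int) (s : String) (start : Int) (depth : Int) : List String :=
  if depth > mc then []
  else
    (if PySem.List.pyGetD ctg depth false then [s] else []) ++
    (PySem.List.pyRange start (order'.length : Int) 1).attach.flatMap
      (fun i => gen order' ctg mc (s ++ PySem.List.pyGetD order' i.1 "") (i.1 + 1) (depth + 1))
termination_by ((order'.length : Int) + 1 - start).toNat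
decreasing_by
  have h := i.2
  rw [PySem.List.mem_pyRange_one] at h
  omega

theorem gen_eq (order' : List String) (ctg : List Bool) (mc : Int) (s : String) (start : Int) (depth : Int) :
    gen order' ctg mc s start depth =
      if depth > mc then []
      else
        (if PySem.List.pyGetD ctg depth false then [s] else []) ++
        (PySem.List.pyRange start (order'.length : Int) 1).flatMap
          (fun i => gen order' ctg mc (s ++ PySem.List.pyGetD order' i "") (i + 1) (depth + 1)) := by
  rw [gen, flatMap_attach_val _
    (fun j => gen order' ctg mc (s ++ PySem.List.pyGetD order' j "") (j + 1) (depth + 1))]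

theorem flatten_intersperse_nil (l : List (List Char)) :
    (List.intersperse [] l).flatten = l.flatten := by
  induction l with
  | nil => rfl
  | cons a t ih =>
    cases t with
    | nil => rfl
    | cons b t2 =>
      rw [show List.intersperse ([] : List Char) (a :: b :: t2)
            = a :: [] :: List.intersperse [] (b :: t2) from rfl]
      simp only [List.flatten_cons, List.nil_append] at ih ⊢
      rw [ih]

-- "".join over a snoc of parts
theorem join_empty_snoc (parts : List String) (t : String) :
    PySem.Str.join "" (parts ++ [t]) = PySem.Str.join "" parts ++ t := by
  apply String.toList_inj.mp
  simp only [PySem.Str.toList_join, String.toList_append, List.map_append, List.map_cons,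
    List.map_nil]
  rw [show ("" : String).toList = [] from rfl]
  rw [PySem.Chars.join, PySem.Chars.join, List.intercalate, List.intercalate,
    flatten_intersperse_nil, flatten_intersperse_nil]
  simp

theorem join_empty_nil : PySem.Str.join "" ([] : List String) = "" := by
  apply String.toList_inj.mp
  simp [PySem.Str.toList_join, PySem.Chars.join_nil]

-- A's dfs produces gen at the corresponding abstract node
theorem dfsA_eq_gen (order' : List String) (ctg : List Bool) (mc : Int) :
    ∀ (fuel : Nat) (now : List Int) (acc : List String),
      ((order'.length : Int) - (if now.length = 0 then -1 else PySem.List.pyGetD now (-1) 0)).toNat < fuel →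
      dfsA order' ctg mc fuel now acc =
        acc ++ gen order' ctg mc
          (PySem.Str.join "" (now.map (fun idx => PySem.List.pyGetD order' idx "")))
          ((if now.length = 0 then -1 else PySem.List.pyGetD now (-1) 0) + 1)
          (now.length : Int) := by
  intro fuel
  induction fuel with
  | zero => intro now acc h; exact absurd h (Nat.not_lt_zero _)
  | succ k ih =>
    intro now acc hk
    rw [dfsA, gen_eq]
    by_cases hd : (now.length : Int) > mc
    · rw [if_pos hd, if_pos hd, List.append_nil]
    · rw [if_neg hd, if_neg hd]
      have hcong : ∀ (a : List String),
          ∀ i ∈ PySem.List.pyRange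
              ((if now.length = 0 then -1 else PySem.List.pyGetD now (-1) 0) + 1)
              (order'.length : Int) 1,
          dfsA order' ctg mc k (now ++ [i]) a
            = a ++ gen order' ctg mc
                (PySem.Str.join "" (now.map (fun idx => PySem.List.pyGetD order' idx ""))
                  ++ PySem.List.pyGetD order' i "")
                (i + 1) ((now.length : Int) + 1) := by
        intro a i hmem
        rw [PySem.List.mem_pyRange_one] at hmem
        have h4 : (if (now ++ [i]).length = 0 then (-1 : Int)
            else PySem.List.pyGetD (now ++ [i]) (-1) 0) = i := by
          rw [if_neg (by simp), pyGetD_snoc_neg_one]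
        rw [ih (now ++ [i]) a (by rw [h4]; omega), h4,
          List.map_append, List.map_cons, List.map_nil, join_empty_snoc,
          show (((now ++ [i]).length : Int)) = (now.length : Int) + 1 by
            simp [List.length_append]]
      rw [PySem.List.foldl_congr_mem _ _ _ _ hcong]
      rw [PySem.List.foldl_append_eq_flatMap]
      split_ifs <;> simp [List.append_assoc]

-- geometric bound: the weights of the pushed children plus the pop are paid for
-- by the weight of the popped node
theorem weight_sum_le (len : Nat) :
    ∀ (k : Nat) (st : Int), ((len : Int) - st).toNat ≤ k →
      (((PySem.List.pyRange st (len : Int) 1).map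
          (fun i => 2 ^ (((len : Int) - (i + 1)).toNat))).sum + 1 : Nat)
        ≤ 2 ^ (((len : Int) - st).toNat) := by
  intro k
  induction k with
  | zero =>
    intro st h
    rw [PySem.List.pyRange_one_eq_nil (by omega)]
    simpa using Nat.one_le_two_pow
  | succ k ih =>
    intro st h
    by_cases hlt : st < (len : Int)
    · rw [PySem.List.pyRange_one_cons hlt]
      simp only [List.map_cons, List.sum_cons]
      have h2 := ih (st + 1) (by omega)
      have h3 : (((len : Int) - st)).toNat = (((len : Int) - (st + 1))).toNat + 1 := by omega
      rw [h3, pow_succ]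
      omega
    · rw [PySem.List.pyRange_one_eq_nil (by omega)]
      simpa using Nat.one_le_two_pow

-- B's stack loop flushes each node to its gen output, given enough fuel
theorem loopB_eq_gen (order' : List String) (ctg : List Bool) (mc : Int) :
    ∀ (fuel : Nat) (stack : List (String × Int × Int)) (res : List String),
      ((stack.map (fun t => 2 ^ (((order'.length : Int) - t.2.1).toNat))).sum : Nat) ≤ fuel →
      loopB order' ctg mc fuel stack res =
        res ++ stack.flatMap (fun t => gen order' ctg mc t.1 t.2.1 t.2.2) := by
  intro fuel
  induction fuel with
  | zero =>
    intro stack res h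
    cases stack with
    | nil => simp [loopB]
    | cons t rest =>
      exfalso
      simp only [List.map_cons, List.sum_cons] at h
      have h1 : (1 : Nat) ≤ 2 ^ (((order'.length : Int) - t.2.1).toNat) := Nat.one_le_two_pow
      omega
  | succ fuel ih =>
    intro stack res h
    cases stack with
    | nil => simp [loopB]
    | cons t rest =>
      obtain ⟨s, st, d⟩ := t
      simp only [List.map_cons, List.sum_cons] at h
      rw [loopB]
      by_cases hd : d > mc
      · rw [if_pos hd]
        rw [ih rest res (by
          have h1 : (1 : Nat) ≤ 2 ^ (((order'.length : Int) - st).toNat) := Nat.one_le_two_pow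
          omega)]
        rw [List.flatMap_cons, gen_eq, if_pos hd, List.nil_append]
      · rw [if_neg hd]
        have hrest' : ((PySem.List.pyRange st (order'.length : Int) 1).reverse).foldl
              (fun stk i => (s ++ PySem.List.pyGetD order' i "", i + 1, d + 1) :: stk) rest
            = (PySem.List.pyRange st (order'.length : Int) 1).map
                (fun i => (s ++ PySem.List.pyGetD order' i "", i + 1, d + 1)) ++ rest := by
          rw [List.foldl_reverse]
          exact List.foldr_cons_eq_append
        have hwt : (((((PySem.List.pyRange st (order'.length : Int) 1).map
              (fun i => (s ++ PySem.List.pyGetD order' i "", i + 1, d + 1)) ++ rest).map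
              (fun t => 2 ^ (((order'.length : Int) - t.2.1).toNat))).sum : Nat)) ≤ fuel := by
          rw [List.map_append, List.sum_append, List.map_map]
          have hgeo := weight_sum_le order'.length (((order'.length : Int) - st).toNat) st le_rfl
          have : ((PySem.List.pyRange st (order'.length : Int) 1).map
              ((fun t : String × Int × Int => 2 ^ (((order'.length : Int) - t.2.1).toNat)) ∘
                (fun i => (s ++ PySem.List.pyGetD order' i "", i + 1, d + 1)))).sum
              = ((PySem.List.pyRange st (order'.length : Int) 1).map
                  (fun i => 2 ^ (((order'.length : Int) - (i + 1)).toNat))).sum := rfl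
          rw [this]
          omega
        rw [hrest', ih _ _ hwt]
        rw [List.flatMap_append, List.flatMap_map]
        rw [List.flatMap_cons, gen_eq (start := st), if_neg hd]
        split_ifs with hc <;> simp [List.cons_append]

-- ===== VERDICT (by name: the statement is the Claim_ definition above) =====
theorem get_combination_spec : Claim_equal_get_combination := by
  intro order ctg mc _ _
  unfold Spec_get_combination get_combination get_combination_alt
  have hA := dfsA_eq_gen (PySem.List.sorted order (fun x => x) false) ctg mc
      ((PySem.List.sorted order (fun x => x) false).length + 2) [] []
      (by simp)
  have hB := loopB_eq_gen (PySem.List.sorted order (fun x => x) false) ctg mc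
      (2 ^ ((PySem.List.sorted order (fun x => x) false).length + 1)) [("", 0, 0)] []
      (by
        have hle : (2 : Nat) ^ ((((PySem.List.sorted order (fun x => x) false).length : Int) - 0).toNat)
            ≤ 2 ^ ((PySem.List.sorted order (fun x => x) false).length + 1) := by
          apply Nat.pow_le_pow_right (by norm_num)
          omega
        simpa using hle)
  rw [hA, hB]
  simp only [List.length_nil, List.map_nil, join_empty_nil, List.nil_append,
    List.flatMap_cons, List.flatMap_nil, List.append_nil, Nat.cast_zero]
  norm_num
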